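-- pv_equiv track=rewrite | github.com/DeepShield-AI/webpki-platform | script/fig_generation/attack_result/2-1-period_analysis.py | compute_chunk_info
-- ===== SOURCE A (Python) =====
-- def compute_chunk_info(days_list):
--     chunks = []
--     days_between_chunks = []
--     current_chunk_size = 1
--     for value in days_list:
--         if value == 0:
--             current_chunk_size += 1
--         else:
--             chunks.append(current_chunk_size)
--             days_between_chunks.append(value)
--             current_chunk_size = 1
--
--     chunks.append(current_chunk_size)
--     return chunks, days_between_chunks
-- ===== SOURCE B (Python) =====
-- def compute_chunk_info(days_list):
--     nonzeros = [(i, v) for i, v in enumerate(days_list) if v != 0]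
--     chunks = []
--     prev = -1
--     for i, _ in nonzeros:
--         chunks.append(i - prev)
--         prev = i
--     chunks.append(len(days_list) - prev)
--     return chunks, [v for _, v in nonzeros]
-- ===== Notes on version B (the rewrite author's own statement) =====
-- stated objective: alternative
-- what changed: Replaces A's running zero-counter state machine with an index table: collect the (index, value) pairs of nonzero entries once, then produce chunk sizes as gaps between consecutive nonzero indices with sentinels -1 and len(days_list).
import Mathlib
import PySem

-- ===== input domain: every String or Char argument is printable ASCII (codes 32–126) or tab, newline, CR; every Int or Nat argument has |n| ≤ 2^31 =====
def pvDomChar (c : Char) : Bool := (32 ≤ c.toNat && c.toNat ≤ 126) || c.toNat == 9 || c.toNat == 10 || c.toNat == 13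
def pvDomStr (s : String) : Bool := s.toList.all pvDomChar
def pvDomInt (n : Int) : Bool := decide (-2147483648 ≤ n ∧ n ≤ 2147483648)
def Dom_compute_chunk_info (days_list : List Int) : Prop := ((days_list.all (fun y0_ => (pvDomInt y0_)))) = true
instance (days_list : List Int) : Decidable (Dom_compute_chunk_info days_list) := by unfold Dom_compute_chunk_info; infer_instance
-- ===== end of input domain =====

-- B replaces A's running zero-counter state machine with an enumerate-filter index table and gap subtraction (alternative decomposition, same O(n) cost).


-- ===== PORT A =====
-- Port of A: one fold over the list carrying (chunks, days_between_chunks, current_chunk_size).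
def compute_chunk_info (days_list : List Int) : List Int × List Int :=
  let s := days_list.foldl
    (fun (s : List Int × List Int × Int) value =>
      if value == 0 then (s.1, s.2.1, s.2.2 + 1)
      else (s.1 ++ [s.2.2], s.2.1 ++ [value], 1))
    ([], [], 1)
  (s.1 ++ [s.2.2], s.2.1)

-- ===== PORT B =====
-- Port of B: enumerate-and-filter the nonzero entries, then gaps between consecutive indices.
def compute_chunk_info_alt (days_list : List Int) : List Int × List Int :=
  let nonzeros := (PySem.List.enumerate days_list).filter (fun p => p.2 ≠ 0)
  let r := nonzeros.foldl (fun (s : List Int × Int) p => (s.1 ++ [p.1 - s.2], p.1)) ([], -1)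
  (r.1 ++ [(days_list.length : Int) - r.2], nonzeros.map Prod.snd)

-- ===== PRECONDITION & SPEC =====
def Spec_compute_chunk_info (days_list : List Int) (out : List Int × List Int) : Prop := out = compute_chunk_info_alt days_list
instance (days_list : List Int) (out : List Int × List Int) : Decidable (Spec_compute_chunk_info days_list out) := by unfold Spec_compute_chunk_info; infer_instance

-- ===== CLAIM (what is proved, stated in full; the proofs are below) =====
def Claim_equal_compute_chunk_info : Prop := ∀ (days_list : List Int), Dom_compute_chunk_info days_list → Spec_compute_chunk_info days_list (compute_chunk_info days_list)

-- ===== LEMMAS AND PROOFS =====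

-- ===== VERDICT (by name: the statement is the Claim_ definition above) =====
-- Generalized loop equivalence: A's fold over a suffix starting at position n, with
-- accumulated chunks c, days d and counter cur, matches B's gap fold with prev = n - cur.
theorem loop_equiv (l : List Int) (n : Int) (c d : List Int) (cur : Int) :
    (let s := l.foldl
        (fun (s : List Int × List Int × Int) value =>
          if value == 0 then (s.1, s.2.1, s.2.2 + 1)
          else (s.1 ++ [s.2.2], s.2.1 ++ [value], 1))
        (c, d, cur)
     (s.1 ++ [s.2.2], s.2.1))
    =
    (let nonzeros := (PySem.List.enumerate l n).filter (fun p => p.2 ≠ 0)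
     let r := nonzeros.foldl (fun (s : List Int × Int) p => (s.1 ++ [p.1 - s.2], p.1)) (c, n - cur)
     (r.1 ++ [(n + l.length) - r.2], d ++ nonzeros.map Prod.snd)) := by
  induction l generalizing n c d cur with
  | nil => simp [PySem.List.enumerate]
  | cons v t ih =>
    by_cases hv : v = 0
    · subst hv
      have := ih (n + 1) c d (cur + 1)
      simp only [PySem.List.enumerate_cons, List.filter_cons, List.foldl_cons] at *
      simpa [show n + 1 - (cur + 1) = n - cur by ring,
             show n + ((t.length : Int) + 1) = n + 1 + t.length by ring] using this
    · have := ih (n + 1) (c ++ [cur]) (d ++ [v]) 1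
      simp only [PySem.List.enumerate_cons, List.filter_cons, List.foldl_cons] at *
      simpa [hv, show n - (n - cur) = cur by ring,
             show n + ((t.length : Int) + 1) = n + 1 + t.length by ring] using this

theorem compute_chunk_info_spec : Claim_equal_compute_chunk_info := by
  intro days_list _
  unfold Spec_compute_chunk_info compute_chunk_info compute_chunk_info_alt
  have := loop_equiv days_list 0 [] [] 1
  simpa using this
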